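-- pv_equiv track=rewrite | github.com/liskos/jakov | ege05/276.py | f
-- ===== SOURCE A (Python) =====
-- def f(n):
--     s1 = 0
--     s2 = 0
--     for digit in str(n):
--         if int(digit) % 2 == 0:
--             s1 += int(digit)
--     for digit in str(n):
--         if int(digit) % 2 != 0:
--             s2 += int(digit)
--     return abs(s1 - s2)
-- ===== SOURCE B (Python) =====
-- def f(n):
--     total = 0
--     for ch in str(n):
--         d = int(ch)
--         total = total + d if d % 2 == 0 else total - d
--     return abs(total)
-- ===== Notes on version B (the rewrite author's own statement) =====
-- stated objective: simpler
-- what changed: Replaces A's two separate passes (even-digit sum and odd-digit sum) by one pass maintaining a single signed running difference, returning its absolute value.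
import Mathlib
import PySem

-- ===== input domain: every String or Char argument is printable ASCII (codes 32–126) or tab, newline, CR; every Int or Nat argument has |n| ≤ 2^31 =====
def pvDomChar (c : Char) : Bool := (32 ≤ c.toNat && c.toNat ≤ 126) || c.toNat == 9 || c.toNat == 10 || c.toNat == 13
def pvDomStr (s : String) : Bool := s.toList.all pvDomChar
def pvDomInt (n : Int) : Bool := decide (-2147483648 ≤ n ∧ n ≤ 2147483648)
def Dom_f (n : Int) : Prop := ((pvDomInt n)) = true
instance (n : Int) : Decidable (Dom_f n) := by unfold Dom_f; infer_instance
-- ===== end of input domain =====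

-- B merges A's two digit-sum passes into one pass keeping a single signed difference; objective: simpler.

-- ===== PORT A =====
-- int(ch) for a single character, as Python's int(); none (ValueError) is unreachable inside Pre_f
-- (str(n) of a nonnegative n consists of digits), defaulted to 0.
def pvDigit (c : Char) : Int := (PySem.Int.ofChars? [c]).getD 0

def f (n : Int) : Int :=
  let s1 := (PySem.Int.toChars n).foldl
    (fun a c => if PySem.Int.mod (pvDigit c) 2 = 0 then a + pvDigit c else a) 0
  let s2 := (PySem.Int.toChars n).foldl
    (fun a c => if PySem.Int.mod (pvDigit c) 2 ≠ 0 then a + pvDigit c else a) 0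
  |s1 - s2|

-- ===== PORT B =====
def f_alt (n : Int) : Int :=
  let t := (PySem.Int.toChars n).foldl
    (fun a c => let d := pvDigit c; if PySem.Int.mod d 2 = 0 then a + d else a - d) 0
  |t|

-- ===== PRECONDITION & SPEC =====
-- Pre_f excludes exactly the negative n, on which str(n) starts with '-' and int('-') raises ValueError in both A and B.
def Pre_f (n : Int) : Prop := 0 ≤ n
instance (n : Int) : Decidable (Pre_f n) := by unfold Pre_f; infer_instance
def pvWitness_f : Int := 12
def Spec_f (n : Int) (out : Int) : Prop := out = f_alt n
instance (n : Int) (out : Int) : Decidable (Spec_f n out) := by unfold Spec_f; infer_instance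

-- ===== CLAIM (what is proved, stated in full; the proofs are below) =====
def Claim_equal_f : Prop := ∀ (n : Int), Dom_f n → Pre_f n → Spec_f n (f n)

-- ===== LEMMAS AND PROOFS =====

-- One pass with a signed accumulator computes the difference of A's two passes.
theorem pv_diff_fold (l : List Char) : ∀ (a b : Int),
    (l.foldl (fun a c => if PySem.Int.mod (pvDigit c) 2 = 0 then a + pvDigit c else a) a)
      - (l.foldl (fun a c => if PySem.Int.mod (pvDigit c) 2 ≠ 0 then a + pvDigit c else a) b)
    = l.foldl (fun a c => let d := pvDigit c; if PySem.Int.mod d 2 = 0 then a + d else a - d) (a - b) := by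
  induction l with
  | nil => intro a b; simp
  | cons c l ih =>
    intro a b
    simp only [List.foldl_cons]
    by_cases h : PySem.Int.mod (pvDigit c) 2 = 0
    · rw [if_pos h, if_neg (not_not_intro h)]
      show _ = List.foldl _ (ite (PySem.Int.mod (pvDigit c) 2 = 0) (a - b + pvDigit c) (a - b - pvDigit c)) l
      rw [if_pos h, show a - b + pvDigit c = a + pvDigit c - b by ring]
      exact ih (a + pvDigit c) b
    · rw [if_neg h, if_pos h]
      show _ = List.foldl _ (ite (PySem.Int.mod (pvDigit c) 2 = 0) (a - b + pvDigit c) (a - b - pvDigit c)) l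
      rw [if_neg h, show a - b - pvDigit c = a - (b + pvDigit c) by ring]
      exact ih a (b + pvDigit c)

-- ===== VERDICT (by name: the statement is the Claim_ definition above) =====
theorem f_spec : Claim_equal_f := by
  intro n _ _
  unfold Spec_f f f_alt
  simp only []
  rw [pv_diff_fold]
  norm_num
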